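-- pv_equiv track=rewrite | github.com/divinrkz/typed-latex | transformer/utils.py | merge_around_multiple_separators
-- ===== SOURCE A (Python) =====
-- def merge_around_multiple_separators(input_list, separator):
--     merged_strings = []
--     current_string = []
--
--     for item in input_list:
--         if item == separator:
--             if current_string:
--                 merged_strings.append(''.join(map(str, current_string)))
--                 current_string = []
--         else:
--             current_string.append(item)
--
--     if current_string:
--         merged_strings.append(''.join(map(str, current_string)))
--
--     return merged_strings
-- ===== SOURCE B (Python) =====
-- def merge_around_multiple_separators(input_list, separator):
--     bounds = [-1] + [i for i, x in enumerate(input_list) if x == separator] + [len(input_list)]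
--     merged = []
--     for a, b in zip(bounds, bounds[1:]):
--         if b - a > 1:
--             merged.append(''.join(map(str, input_list[a + 1:b])))
--     return merged
-- ===== Notes on version B (the rewrite author's own statement) =====
-- stated objective: alternative
-- what changed: Instead of a streaming loop with a current_string buffer, B first computes the list of separator positions (with -1 and len as sentinels), then slices the list between consecutive boundaries and joins each non-empty slice.
import Mathlib
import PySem

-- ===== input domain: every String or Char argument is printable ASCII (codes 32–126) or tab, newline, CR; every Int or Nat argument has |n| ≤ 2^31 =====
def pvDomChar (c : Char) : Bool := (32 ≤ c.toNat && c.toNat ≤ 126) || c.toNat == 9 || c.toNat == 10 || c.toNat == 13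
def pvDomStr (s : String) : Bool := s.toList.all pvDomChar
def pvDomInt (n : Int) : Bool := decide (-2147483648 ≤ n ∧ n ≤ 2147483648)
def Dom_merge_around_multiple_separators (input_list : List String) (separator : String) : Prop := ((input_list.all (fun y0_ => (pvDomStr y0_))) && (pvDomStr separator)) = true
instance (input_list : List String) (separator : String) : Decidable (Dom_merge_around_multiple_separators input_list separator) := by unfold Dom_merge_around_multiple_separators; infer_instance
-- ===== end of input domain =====

-- B replaces A's streaming buffer loop by two staged passes: collect separator positions, then slice
-- between consecutive boundaries (alternative decomposition, same cost); RETURN values are proved equal.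

-- ===== PORT A =====
-- accumulator loop: state (merged_strings, current_string); ''.join(map(str, cur)) = String.join cur
-- (items are strings on Dom, so str is the identity)
def merge_around_multiple_separators (input_list : List String) (separator : String) : List String :=
  let st := input_list.foldl
    (fun (s : List String × List String) item =>
      if item == separator then
        if s.2.isEmpty then s else (s.1 ++ [String.join s.2], [])
      else
        (s.1, s.2 ++ [item]))
    ([], [])
  if st.2.isEmpty then st.1 else st.1 ++ [String.join st.2]

-- ===== PORT B =====
-- [i for i, x in enumerate(input_list) if x == separator], with i carried as the enumerate counter
def mams_sepIdx (l : List String) (separator : String) (i : Int) : List Int :=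
  match l with
  | [] => []
  | x :: xs => if x == separator then i :: mams_sepIdx xs separator (i + 1) else mams_sepIdx xs separator (i + 1)

-- bounds = [-1] + sep positions + [len]; zip(bounds, bounds[1:]); join each slice longer than 0
def merge_around_multiple_separators_alt (input_list : List String) (separator : String) : List String :=
  let bounds : List Int := -1 :: (mams_sepIdx input_list separator 0 ++ [(input_list.length : Int)])
  (bounds.zip bounds.tail).foldl
    (fun acc p =>
      if p.2 - p.1 > 1 then
        acc ++ [String.join (PySem.List.slice input_list (some (p.1 + 1)) (some p.2))]
      else acc)
    ([] : List String)

-- ===== PRECONDITION & SPEC =====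
def Spec_merge_around_multiple_separators (input_list : List String) (separator : String) (out : List String) : Prop := out = merge_around_multiple_separators_alt input_list separator
instance (input_list : List String) (separator : String) (out : List String) : Decidable (Spec_merge_around_multiple_separators input_list separator out) := by unfold Spec_merge_around_multiple_separators; infer_instance

-- ===== CLAIM (what is proved, stated in full; the proofs are below) =====
def Claim_equal_merge_around_multiple_separators : Prop := ∀ (input_list : List String) (separator : String), Dom_merge_around_multiple_separators input_list separator → Spec_merge_around_multiple_separators input_list separator (merge_around_multiple_separators input_list separator)

-- ===== LEMMAS AND PROOFS =====

-- reference function: the list of maximal non-separator runs, each joined (proof-side only)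
def mams_groups (separator : String) : List String → List String
  | [] => []
  | x :: xs =>
    if x == separator then
      mams_groups separator xs
    else
      String.join (x :: xs.takeWhile (fun s => s != separator))
        :: mams_groups separator (xs.dropWhile (fun s => s != separator))
termination_by l => l.length
decreasing_by
  · simp
  · simpa using Nat.lt_succ_of_le (List.length_dropWhile_le _ xs)

theorem mams_takeWhile_all {sep : String} {l : List String} (h : sep ∉ l) :
    l.takeWhile (fun s => s != sep) = l := by
  induction l with
  | nil => rfl
  | cons x xs ih =>
    simp only [List.mem_cons, not_or] at h
    simp [List.takeWhile, show (x != sep) = true by simpa using Ne.symm h.1, ih h.2]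

theorem mams_dropWhile_all {sep : String} {l : List String} (h : sep ∉ l) :
    l.dropWhile (fun s => s != sep) = [] := by
  induction l with
  | nil => rfl
  | cons x xs ih =>
    simp only [List.mem_cons, not_or] at h
    simp [List.dropWhile, show (x != sep) = true by simpa using Ne.symm h.1, ih h.2]

theorem mams_groups_nil (sep : String) : mams_groups sep [] = [] := by
  rw [mams_groups]

theorem mams_groups_no_sep {sep : String} {cur : List String} (h : sep ∉ cur) :
    mams_groups sep cur = if cur.isEmpty then [] else [String.join cur] := by
  cases cur with
  | nil => simp [mams_groups_nil]
  | cons x xs =>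
    simp only [List.mem_cons, not_or] at h
    rw [mams_groups]
    simp [show (x == sep) = false by simpa using Ne.symm h.1,
      mams_takeWhile_all h.2, mams_dropWhile_all h.2, mams_groups_nil]

-- the A-side loop invariant: running A's fold from state (acc, cur) with sep ∉ cur
theorem mams_invariant (sep : String) (l : List String) :
    ∀ (acc cur : List String), sep ∉ cur →
    (let st := l.foldl
        (fun (s : List String × List String) item =>
          if item == sep then
            if s.2.isEmpty then s else (s.1 ++ [String.join s.2], [])
          else
            (s.1, s.2 ++ [item]))
        (acc, cur)
     if st.2.isEmpty then st.1 else st.1 ++ [String.join st.2])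
      = acc ++ mams_groups sep (cur ++ l) := by
  induction l with
  | nil =>
    intro acc cur h
    simp only [List.foldl_nil, List.append_nil, mams_groups_no_sep h]
    cases cur <;> simp
  | cons i l ih =>
    intro acc cur h
    by_cases hi : i = sep
    · rw [hi]
      cases cur with
      | nil =>
        have hg : mams_groups sep (sep :: l) = mams_groups sep l := by
          rw [mams_groups]; simp
        simpa [hg] using ih acc [] (by simp)
      | cons c cs =>
        simp only [List.mem_cons, not_or] at h
        have := ih (acc ++ [String.join (c :: cs)]) [] (by simp)
        simp only [List.foldl_cons, beq_self_eq_true, if_true, List.isEmpty_cons,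
          Bool.false_eq_true, if_false] at *
        rw [this]
        rw [show (c :: cs) ++ sep :: l = c :: (cs ++ sep :: l) by simp]
        rw [mams_groups]
        simp [show (c == sep) = false by simpa using Ne.symm h.1,
          List.takeWhile_append, mams_takeWhile_all h.2,
          List.dropWhile_append, mams_dropWhile_all h.2]
        rw [mams_groups]
        simp
    · have h' : sep ∉ cur ++ [i] := by
        simp only [List.mem_append, List.mem_singleton, not_or]
        exact ⟨h, fun e => hi e.symm⟩
      have := ih acc (cur ++ [i]) h'
      simp only [List.foldl_cons, show (i == sep) = false by simpa using hi,
        Bool.false_eq_true, if_false] at *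
      rw [this]
      simp

-- consecutive pairs of a :: t (proof-side view of zip(bounds, bounds[1:]))
def mams_pairs : Int → List Int → List (Int × Int)
  | _, [] => []
  | a, b :: t => (a, b) :: mams_pairs b t

theorem mams_zip_tail (a : Int) (t : List Int) : (a :: t).zip t = mams_pairs a t := by
  induction t generalizing a with
  | nil => rfl
  | cons b t ih => simpa [List.zip, mams_pairs] using ih b

-- the B-side fold, abstracted over the pair list
def mamsF (l : List String) (ps : List (Int × Int)) (acc : List String) : List String :=
  ps.foldl
    (fun acc p =>
      if p.2 - p.1 > 1 then
        acc ++ [String.join (PySem.List.slice l (some (p.1 + 1)) (some p.2))]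
      else acc)
    acc

theorem mamsF_acc (l : List String) (ps : List (Int × Int)) (acc : List String) :
    mamsF l ps acc = acc ++ mamsF l ps [] := by
  induction ps generalizing acc with
  | nil => simp [mamsF]
  | cons p ps ih =>
    simp only [mamsF, List.foldl_cons] at *
    by_cases h : p.2 - p.1 > 1
    · rw [if_pos h, if_pos h, ih, ih (_ ++ _)]; simp
    · rw [if_neg h, if_neg h, ih]

theorem mams_alt_eq (l : List String) (sep : String) :
    merge_around_multiple_separators_alt l sep
      = mamsF l (mams_pairs (-1) (mams_sepIdx l sep 0 ++ [(l.length : Int)])) [] := by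
  rw [← mams_zip_tail]
  rfl

theorem mams_sepIdx_ge (sep : String) (l : List String) :
    ∀ (i : Int), ∀ m ∈ mams_sepIdx l sep i, i ≤ m := by
  induction l with
  | nil => intro i m hm; simp [mams_sepIdx] at hm
  | cons x xs ih =>
    intro i m hm
    simp only [mams_sepIdx] at hm
    by_cases hx : (x == sep) = true
    · rw [if_pos hx] at hm
      rcases List.mem_cons.1 hm with h | h
      · omega
      · have := ih (i + 1) m h; omega
    · rw [if_neg hx] at hm
      have := ih (i + 1) m hm; omega

theorem mams_sepIdx_shift (sep : String) (l : List String) :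
    ∀ (i k : Int), mams_sepIdx l sep (i + k) = (mams_sepIdx l sep i).map (· + k) := by
  induction l with
  | nil => intro i k; simp [mams_sepIdx]
  | cons x xs ih =>
    intro i k
    simp only [mams_sepIdx]
    by_cases hx : (x == sep) = true
    · rw [if_pos hx, if_pos hx, show i + k + 1 = (i + 1) + k by ring, ih]
      simp
    · rw [if_neg hx, if_neg hx, show i + k + 1 = (i + 1) + k by ring, ih]

theorem mams_sepIdx_append (sep : String) (u v : List String) :
    ∀ (i : Int), mams_sepIdx (u ++ v) sep i = mams_sepIdx u sep i ++ mams_sepIdx v sep (i + u.length) := by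
  induction u with
  | nil => intro i; simp [mams_sepIdx]
  | cons x xs ih =>
    intro i
    simp only [List.cons_append, mams_sepIdx]
    by_cases hx : (x == sep) = true
    · rw [if_pos hx, if_pos hx, ih, List.cons_append]
      simp only [List.length_cons]
      rw [show i + (((xs.length + 1 : Nat)) : Int) = (i + 1) + (xs.length : Int) by push_cast; ring]
    · rw [if_neg hx, if_neg hx, ih]
      simp only [List.length_cons]
      rw [show i + (((xs.length + 1 : Nat)) : Int) = (i + 1) + (xs.length : Int) by push_cast; ring]

theorem mams_sepIdx_no_sep {sep : String} {u : List String} (h : sep ∉ u) :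
    ∀ (i : Int), mams_sepIdx u sep i = [] := by
  induction u with
  | nil => intro i; rfl
  | cons x xs ih =>
    intro i
    simp only [List.mem_cons, not_or] at h
    simp [mams_sepIdx, show (x == sep) = false by simpa using Ne.symm h.1, ih h.2]

theorem mams_pairs_map_shift (k : Int) (t : List Int) :
    ∀ (a : Int), mams_pairs (a + k) (t.map (· + k)) = (mams_pairs a t).map (fun p => (p.1 + k, p.2 + k)) := by
  induction t with
  | nil => intro a; rfl
  | cons b t ih => intro a; simp [mams_pairs, ih b]

theorem mams_pairs_mem (t : List Int) :
    ∀ (a : Int), ∀ p ∈ mams_pairs a t, (p.1 = a ∨ p.1 ∈ t) ∧ p.2 ∈ t := by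
  induction t with
  | nil => intro a p hp; simp [mams_pairs] at hp
  | cons b t ih =>
    intro a p hp
    rcases List.mem_cons.1 hp with h | h
    · subst h; simp
    · rcases ih b p h with ⟨h1, h2⟩
      exact ⟨by rcases h1 with h1 | h1 <;> simp [h1], by simp [h2]⟩

theorem mams_slice_shift (u v : List String) (i j : Int) (hi : 0 ≤ i) (hj : 0 ≤ j) :
    PySem.List.slice (u ++ v) (some (i + u.length)) (some (j + u.length))
      = PySem.List.slice v (some i) (some j) := by
  obtain ⟨a, rfl⟩ := Int.eq_ofNat_of_zero_le hi
  obtain ⟨b, rfl⟩ := Int.eq_ofNat_of_zero_le hj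
  rw [show ((a : Int) + u.length) = ((a + u.length : Nat) : Int) by push_cast; ring,
    show ((b : Int) + u.length) = ((b + u.length : Nat) : Int) by push_cast; ring,
    PySem.List.slice_natCast, PySem.List.slice_natCast]
  rw [show a + u.length = u.length + a by ring, List.drop_append,
    List.drop_eq_nil_of_le (Nat.le_add_right _ _),
    show u.length + a - u.length = a by omega, List.nil_append]
  congr 1
  omega

theorem mamsF_shift (u v : List String) :
    ∀ (ps : List (Int × Int)) (acc : List String),
      (∀ p ∈ ps, -1 ≤ p.1 ∧ 0 ≤ p.2) →
      mamsF (u ++ v) (ps.map (fun p => (p.1 + u.length, p.2 + u.length))) acc = mamsF v ps acc := by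
  intro ps
  induction ps with
  | nil => intro acc _; rfl
  | cons p ps ih =>
    intro acc hmem
    rcases hmem p (by simp) with ⟨h1, h2⟩
    simp only [List.map_cons, mamsF, List.foldl_cons]
    rw [show p.2 + (u.length : Int) - (p.1 + u.length) = p.2 - p.1 by ring]
    by_cases h : p.2 - p.1 > 1
    · rw [if_pos h, if_pos h,
        show p.1 + (u.length : Int) + 1 = (p.1 + 1) + u.length by ring,
        mams_slice_shift u v (p.1 + 1) p.2 (by omega) h2]
      exact ih _ (fun q hq => hmem q (by simp [hq]))
    · rw [if_neg h, if_neg h]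
      exact ih _ (fun q hq => hmem q (by simp [hq]))

theorem mams_bounds_nonneg (sep : String) (l : List String) :
    ∀ p ∈ mams_pairs (-1) (mams_sepIdx l sep 0 ++ [(l.length : Int)]), -1 ≤ p.1 ∧ 0 ≤ p.2 := by
  intro p hp
  have key : ∀ m ∈ mams_sepIdx l sep 0 ++ [(l.length : Int)], (0 : Int) ≤ m := by
    intro m hm
    rcases List.mem_append.1 hm with h | h
    · exact mams_sepIdx_ge sep l 0 m h
    · simp at h; omega
  rcases mams_pairs_mem _ (-1) p hp with ⟨h1, h2⟩
  refine ⟨?_, key _ h2⟩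
  rcases h1 with h1 | h1
  · omega
  · have := key _ h1; omega

-- B equals the reference run decomposition
theorem mams_alt_groups (sep : String) :
    ∀ (n : ℕ) (l : List String), l.length ≤ n →
      merge_around_multiple_separators_alt l sep = mams_groups sep l := by
  intro n
  induction n with
  | zero =>
    intro l hl
    have : l = [] := List.eq_nil_of_length_eq_zero (by omega)
    subst this
    rw [mams_alt_eq, mams_groups_nil]
    simp [mams_sepIdx, mams_pairs, mamsF]
  | succ n ih =>
    intro l hl
    cases l with
    | nil =>
      rw [mams_alt_eq, mams_groups_nil]
      simp [mams_sepIdx, mams_pairs, mamsF]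
    | cons x xs =>
      by_cases hx : x = sep
      · -- leading separator: B skips the (-1,0) pair; shift everything left by 1
        subst hx
        rw [mams_alt_eq]
        have h0 : mams_sepIdx (x :: xs) x 0 = 0 :: (mams_sepIdx xs x 0).map (· + 1) := by
          simp only [mams_sepIdx, beq_self_eq_true, if_pos]
          rw [show (0 : Int) + 1 = 0 + 1 from rfl, mams_sepIdx_shift]
        rw [h0]
        have hlen : ((x :: xs).length : Int) = (xs.length : Int) + 1 := by
          simp only [List.length_cons]; push_cast; ring
        rw [hlen,
          show ((0 : Int) :: (mams_sepIdx xs x 0).map (· + 1) ++ [(xs.length : Int) + 1])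
            = (0 : Int) :: ((mams_sepIdx xs x 0 ++ [(xs.length : Int)]).map (· + 1)) by simp]
        rw [show mams_pairs (-1) ((0:Int) :: ((mams_sepIdx xs x 0 ++ [(xs.length : Int)]).map (· + 1)))
            = (-1, 0) :: mams_pairs 0 ((mams_sepIdx xs x 0 ++ [(xs.length : Int)]).map (· + 1)) from rfl]
        rw [show (0 : Int) = -1 + 1 from rfl, mams_pairs_map_shift]
        simp only [mamsF, List.foldl_cons]
        norm_num
        have := mamsF_shift [x] xs (mams_pairs (-1) (mams_sepIdx xs x 0 ++ [(xs.length : Int)])) []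
          (mams_bounds_nonneg x xs)
        simp only [List.length_cons, List.length_nil, List.singleton_append] at this
        rw [show ((1 : Nat) : Int) = 1 from rfl] at this
        rw [← mamsF, this, ← mams_alt_eq, ih xs (by simpa using Nat.le_of_succ_le_succ hl)]
        rw [mams_groups]; simp
      · -- leading non-separator: the first slice is the first run
        have hxb : (x == sep) = false := by simpa using hx
        set r := xs.takeWhile (fun s => s != sep) with hr
        set d := xs.dropWhile (fun s => s != sep) with hd
        have hxs : r ++ d = xs := List.takeWhile_append_dropWhile
        have hsepr : sep ∉ x :: r := by
          intro hmem
          rcases List.mem_cons.1 hmem with h | h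
          · exact hx h.symm
          · have := List.mem_takeWhile_imp (hr ▸ h)
            simp at this
        cases hdc : d with
        | nil =>
          -- no separator at all: one pair (-1, len), one slice = the whole list
          have hnos : sep ∉ x :: xs := by
            rw [← hxs, hdc, List.append_nil]
            exact hsepr
          rw [mams_alt_eq, mams_sepIdx_no_sep hnos]
          simp only [List.nil_append]
          rw [show mams_pairs (-1) [((x :: xs).length : Int)]
              = [(-1, ((x :: xs).length : Int))] from rfl]
          simp only [mamsF, List.foldl_cons, List.foldl_nil]
          rw [if_pos (by simp only [List.length_cons]; push_cast; omega)]
          rw [show (-1 : Int) + 1 = ((0 : Nat) : Int) from rfl, PySem.List.slice_natCast]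
          simp only [List.drop_zero, Nat.sub_zero, List.take_length, List.nil_append]
          rw [mams_groups_no_sep hnos]
          simp
        | cons s d' =>
          have hs : s = sep := by
            have := List.head_dropWhile_not (p := fun s => s != sep) (l := xs)
            rw [← hd, hdc] at this
            simpa using this (by simp)
          rw [hs] at hdc
          -- l = (x :: r) ++ (sep :: d'); first separator index is r.length + 1
          have hldec : x :: xs = (x :: r) ++ (sep :: d') := by rw [← hxs, hdc]; simp
          have hidx : mams_sepIdx (x :: xs) sep 0
              = ((r.length : Int) + 1) :: (mams_sepIdx d' sep 0).map (· + ((r.length : Int) + 2)) := by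
            rw [hldec, mams_sepIdx_append, mams_sepIdx_no_sep hsepr]
            simp only [List.nil_append, List.length_cons]
            rw [show mams_sepIdx (sep :: d') sep ((0 : Int) + ((r.length + 1 : Nat) : Int))
                = ((0 : Int) + ((r.length + 1 : Nat) : Int))
                  :: mams_sepIdx d' sep ((0 : Int) + ((r.length + 1 : Nat) : Int) + 1)
                by simp [mams_sepIdx]]
            congr 1
            · push_cast; ring
            · rw [show (0 : Int) + ((r.length + 1 : Nat) : Int) + 1
                  = 0 + ((r.length : Int) + 2) by push_cast; ring, mams_sepIdx_shift]
          have hlen : (((x :: xs).length : Nat) : Int) = ((d'.length : Int)) + ((r.length : Int) + 2) := by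
            rw [hldec]
            simp only [List.length_append, List.length_cons]
            push_cast; ring
          rw [mams_alt_eq, hidx, hlen,
            show (((r.length : Int) + 1) :: (mams_sepIdx d' sep 0).map (· + ((r.length : Int) + 2))
                ++ [((d'.length : Int)) + ((r.length : Int) + 2)])
              = ((r.length : Int) + 1)
                :: ((mams_sepIdx d' sep 0 ++ [(d'.length : Int)]).map (· + ((r.length : Int) + 2)))
              by simp]
          rw [show mams_pairs (-1) (((r.length : Int) + 1)
                :: ((mams_sepIdx d' sep 0 ++ [(d'.length : Int)]).map (· + ((r.length : Int) + 2))))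
              = (-1, ((r.length : Int) + 1))
                :: mams_pairs ((r.length : Int) + 1)
                    ((mams_sepIdx d' sep 0 ++ [(d'.length : Int)]).map (· + ((r.length : Int) + 2)))
              from rfl]
          rw [show ((r.length : Int) + 1) = -1 + ((r.length : Int) + 2) by ring, mams_pairs_map_shift]
          simp only [mamsF, List.foldl_cons]
          rw [if_pos (by omega)]
          -- the first slice is x :: r
          have hslice : PySem.List.slice (x :: xs) (some ((-1 : Int) + 1)) (some (-1 + ((r.length : Int) + 2)))
              = x :: r := by
            rw [show ((-1 : Int) + 1) = ((0 : Nat) : Int) from rfl,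
              show (-1 + ((r.length : Int) + 2)) = ((r.length + 1 : Nat) : Int) by push_cast; ring,
              PySem.List.slice_natCast]
            simp only [List.drop_zero, Nat.sub_zero]
            rw [hldec, show r.length + 1 = (x :: r).length by simp, List.take_left]
          rw [hslice, ← mamsF]
          rw [mamsF_acc]
          have hshift := mamsF_shift ((x :: r) ++ [sep]) d'
            (mams_pairs (-1) (mams_sepIdx d' sep 0 ++ [(d'.length : Int)])) []
            (mams_bounds_nonneg sep d')
          have hul : ((((x :: r) ++ [sep]).length : Nat) : Int) = (r.length : Int) + 2 := by
            simp only [List.length_append, List.length_cons, List.length_nil]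
            push_cast; ring
          rw [hul] at hshift
          rw [show ((x :: r) ++ [sep]) ++ d' = x :: xs by rw [hldec]; simp] at hshift
          rw [hshift, ← mams_alt_eq]
          have hd'len : d'.length ≤ n := by
            have : xs.length = r.length + 1 + d'.length := by
              rw [← hxs, hdc]; simp; omega
            simp only [List.length_cons] at hl
            omega
          rw [ih d' hd'len]
          -- reference side
          rw [mams_groups]
          rw [if_neg (by simp [hxb])]
          rw [← hr, ← hd, hdc]
          rw [show mams_groups sep (sep :: d') = mams_groups sep d' by rw [mams_groups]; simp]
          rfl

-- ===== VERDICT (by name: the statement is the Claim_ definition above) =====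
theorem merge_around_multiple_separators_spec : Claim_equal_merge_around_multiple_separators := by
  intro input_list separator _
  unfold Spec_merge_around_multiple_separators
  rw [mams_alt_groups separator input_list.length input_list le_rfl]
  unfold merge_around_multiple_separators
  simpa using mams_invariant separator input_list [] [] (by simp)
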